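-- pv_equiv track=rewrite | github.com/g-simmons/OSSCaster | Sustainability_Analysis/2_monthly_features/features.py | cal_both_sided_edges
-- ===== SOURCE A (Python) =====
-- def cal_both_sided_edges(edges_list):
--
--     edge_dict = {}
--     num = 0
--
--     count_edge = {}
--
--     for sender, corr in edges_list:
--         if sender not in edge_dict:
--             edge_dict[sender] = set()
--         edge_dict[sender].add(corr)
--
--     for sender, corr in edges_list:
--
--         if sender in count_edge and corr in count_edge[sender]:
--             continue
--
--         if (corr in edge_dict) and (sender in edge_dict[corr]):
--             num += 1
--             if sender not in count_edge:
--                 count_edge[sender] = set()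
--             count_edge[sender].add(corr)
--
--     return num
-- ===== SOURCE B (Python) =====
-- def cal_both_sided_edges(edges_list):
--     # Group deduplicated edges by their unordered endpoint pair; an unordered
--     # pair {u,v} with u != v is reciprocated iff its group holds both directions
--     # (size 2, contributing 2 counted edges); a self-loop is always reciprocated
--     # (contributing 1). No reversed-edge membership test is needed.
--     groups = {}
--     for sender, corr in set(edges_list):
--         key = (sender, corr) if sender <= corr else (corr, sender)
--         groups[key] = groups.get(key, 0) + 1
--     num = 0
--     for (u, v), c in groups.items():
--         if u == v:
--             num += 1
--         elif c == 2:
--             num += 2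
--     return num
-- ===== Notes on version B (the rewrite author's own statement) =====
-- stated objective: alternative
-- what changed: B groups the deduplicated edges under a canonical (min,max) endpoint key and derives the count from each group's size (size-2 group = 2 reciprocated edges, self-loop = 1), replacing A's adjacency dict-of-sets, reversed-edge membership test and count_edge dedup pass entirely.
import Mathlib
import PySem

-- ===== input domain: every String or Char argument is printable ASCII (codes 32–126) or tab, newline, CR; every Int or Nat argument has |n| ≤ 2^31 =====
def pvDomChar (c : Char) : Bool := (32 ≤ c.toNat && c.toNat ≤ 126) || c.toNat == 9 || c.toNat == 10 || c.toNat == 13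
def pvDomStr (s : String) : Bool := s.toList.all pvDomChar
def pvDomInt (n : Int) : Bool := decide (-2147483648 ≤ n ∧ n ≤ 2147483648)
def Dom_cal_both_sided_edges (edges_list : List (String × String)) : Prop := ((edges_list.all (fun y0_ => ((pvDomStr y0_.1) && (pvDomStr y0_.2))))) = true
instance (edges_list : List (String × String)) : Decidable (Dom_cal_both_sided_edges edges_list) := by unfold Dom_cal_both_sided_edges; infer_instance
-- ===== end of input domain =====

-- B groups the deduplicated edges under a canonical (min, max) endpoint key and reads the
-- answer off the group sizes, replacing A's adjacency dict-of-sets, reversed-edge membership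
-- test and count_edge dedup pass (alternative algorithm; same asymptotic cost).

-- ===== PORT A =====
-- A-side helpers: Python's 'x in d and y in d[x]' (the d[x] lookup is guarded by 'x in d')
def pvMemd (d : PySem.Dict String (PySem.Set String)) (x y : String) : Bool :=
  d.contains x && PySem.Set.contains (d.getD x PySem.Set.empty) y
-- Python's 'if x not in d: d[x] = set()' followed by 'd[x].add(y)' (shared by A's two loops)
def pvStep (d : PySem.Dict String (PySem.Set String)) (p : String × String) :
    PySem.Dict String (PySem.Set String) :=
  (if d.contains p.1 then d else d.insert p.1 PySem.Set.empty).modify p.1 PySem.Set.empty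
    (fun s => PySem.Set.add s p.2)

def cal_both_sided_edges (edges_list : List (String × String)) : Int :=
  -- first loop: build edge_dict (dict of sets)
  let edge_dict : PySem.Dict String (PySem.Set String) :=
    edges_list.foldl pvStep PySem.Dict.empty
  -- second loop: state (num, count_edge)
  let st := edges_list.foldl (fun (st : Int × PySem.Dict String (PySem.Set String)) p =>
      if pvMemd st.2 p.1 p.2 then st
      else if pvMemd edge_dict p.2 p.1 then (st.1 + 1, pvStep st.2 p)
      else st) ((0 : Int), PySem.Dict.empty)
  st.1

-- ===== PORT B =====
-- Lean's String ≤ is lexicographic over code points, exactly Python's 'sender <= corr'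
def pvKey (p : String × String) : String × String :=
  if p.1 ≤ p.2 then p else (p.2, p.1)

def cal_both_sided_edges_alt (edges_list : List (String × String)) : Int :=
  let S : PySem.Set (String × String) := PySem.Set.ofList edges_list
  -- 'groups[key] = groups.get(key, 0) + 1' over the deduplicated edges; the dict is only
  -- summed over afterwards, so iterating the Set's list is exact
  let groups : PySem.Dict (String × String) Int :=
    S.foldl (fun d p => d.insert (pvKey p) (d.getD (pvKey p) 0 + 1)) PySem.Dict.empty
  groups.items.foldl (fun n kv =>
    if kv.1.1 == kv.1.2 then n + 1
    else if kv.2 == 2 then n + 2 else n) 0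

-- ===== PRECONDITION & SPEC =====
def Spec_cal_both_sided_edges (edges_list : List (String × String)) (out : Int) : Prop := out = cal_both_sided_edges_alt edges_list
instance (edges_list : List (String × String)) (out : Int) : Decidable (Spec_cal_both_sided_edges edges_list out) := by unfold Spec_cal_both_sided_edges; infer_instance

-- ===== CLAIM (what is proved, stated in full; the proofs are below) =====
def Claim_equal_cal_both_sided_edges : Prop := ∀ (edges_list : List (String × String)), Dom_cal_both_sided_edges edges_list → Spec_cal_both_sided_edges edges_list (cal_both_sided_edges edges_list)

-- ===== LEMMAS AND PROOFS =====

theorem pvMemd_step (d : PySem.Dict String (PySem.Set String)) (p : String × String)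
    (x y : String) :
    pvMemd (pvStep d p) x y = true ↔ (x, y) = p ∨ pvMemd d x y = true := by
  obtain ⟨a, b⟩ := p
  by_cases hc : d.contains a = true
  · by_cases hx : x = a <;>
      simp [pvMemd, pvStep, hc, hx, PySem.Dict.contains_modify, PySem.Dict.getD_modify,
        PySem.Set.mem_add, Prod.ext_iff] <;> tauto
  · have hc' : d.contains a = false := by simpa using hc
    by_cases hx : x = a <;>
      simp [pvMemd, pvStep, hc', hx, PySem.Dict.contains_modify, PySem.Dict.getD_modify,
        PySem.Dict.contains_insert, PySem.Dict.getD_insert,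
        PySem.Set.mem_add, Prod.ext_iff, PySem.Set.empty] <;> tauto

theorem pvMemd_foldl (l : List (String × String)) (d : PySem.Dict String (PySem.Set String))
    (x y : String) :
    pvMemd (l.foldl pvStep d) x y = true ↔ (x, y) ∈ l ∨ pvMemd d x y = true := by
  induction l generalizing d with
  | nil => simp
  | cons p t ih =>
    simp only [List.foldl_cons, ih, pvMemd_step, List.mem_cons]
    tauto

theorem pvMemd_empty (x y : String) : pvMemd PySem.Dict.empty x y = false := by
  simp [pvMemd, PySem.Dict.contains_empty]

-- abstract version of A's second loop: V = list of pairs already counted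
def pvLoopA (L : List (String × String)) (V : List (String × String)) (n : Int) :
    List (String × String) → Int
  | [] => n
  | p :: t =>
      if p ∈ V then pvLoopA L V n t
      else if (p.2, p.1) ∈ L then pvLoopA L (p :: V) (n + 1) t
      else pvLoopA L V n t

theorem pvLoopA_card (L : List (String × String)) (t : List (String × String)) :
    ∀ (V : List (String × String)) (n : Int),
    pvLoopA L V n t =
      n + ((t.toFinset.filter (fun p => (p.2, p.1) ∈ L ∧ p ∉ V)).card : Int) := by
  induction t with
  | nil => intro V n; simp [pvLoopA]
  | cons p t ih =>
    intro V n
    have hins : (p :: t).toFinset = insert p t.toFinset := by simp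
    by_cases hV : p ∈ V
    · rw [pvLoopA, if_pos hV, ih, hins, Finset.filter_insert, if_neg (by simp [hV])]
    · by_cases hR : (p.2, p.1) ∈ L
      · rw [pvLoopA, if_neg hV, if_pos hR, ih, hins, Finset.filter_insert,
          if_pos (by simp [hR, hV])]
        have herase : t.toFinset.filter (fun q => (q.2, q.1) ∈ L ∧ q ∉ p :: V)
            = (t.toFinset.filter (fun q => (q.2, q.1) ∈ L ∧ q ∉ V)).erase p := by
          ext q
          simp only [Finset.mem_filter, Finset.mem_erase, List.mem_cons]
          tauto
        have hins2 : insert p (t.toFinset.filter (fun q => (q.2, q.1) ∈ L ∧ q ∉ V))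
            = insert p ((t.toFinset.filter (fun q => (q.2, q.1) ∈ L ∧ q ∉ V)).erase p) := by
          ext q
          simp only [Finset.mem_insert, Finset.mem_erase]
          by_cases hq : q = p <;> simp [hq]
        have hcard : (insert p ((t.toFinset.filter (fun q => (q.2, q.1) ∈ L ∧ q ∉ V)).erase p)).card
            = ((t.toFinset.filter (fun q => (q.2, q.1) ∈ L ∧ q ∉ V)).erase p).card + 1 :=
          Finset.card_insert_of_notMem (by simp)
        rw [hins2, hcard, herase]
        push_cast
        ring
      · rw [pvLoopA, if_neg hV, if_neg hR, ih, hins, Finset.filter_insert,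
          if_neg (by simp [hR])]

-- A's second fold tracked against the abstract loop (ed stands for the finished edge_dict)
theorem pvFold2_eq (L : List (String × String)) (ed : PySem.Dict String (PySem.Set String))
    (hed : ∀ x y, pvMemd ed x y = true ↔ (x, y) ∈ L) (t : List (String × String)) :
    ∀ (n : Int) (ce : PySem.Dict String (PySem.Set String)) (V : List (String × String)),
    (∀ x y, pvMemd ce x y = true ↔ (x, y) ∈ V) →
    (t.foldl (fun (st : Int × PySem.Dict String (PySem.Set String)) p =>
      if pvMemd st.2 p.1 p.2 then st
      else if pvMemd ed p.2 p.1 then (st.1 + 1, pvStep st.2 p)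
      else st) (n, ce)).1 = pvLoopA L V n t := by
  induction t with
  | nil => intro n ce V _; simp [pvLoopA]
  | cons p t ih =>
    intro n ce V hinv
    rw [List.foldl_cons, pvLoopA]
    by_cases hV : p ∈ V
    · have h1 : pvMemd ce p.1 p.2 = true := (hinv p.1 p.2).mpr hV
      simp only [h1, if_true, if_pos hV]
      exact ih n ce V hinv
    · have h1 : pvMemd ce p.1 p.2 = false := by
        by_contra h
        simp only [Bool.not_eq_false] at h
        exact hV ((hinv p.1 p.2).mp h)
      by_cases hR : (p.2, p.1) ∈ L
      · have h2 : pvMemd ed p.2 p.1 = true := (hed p.2 p.1).mpr hR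
        simp only [h1, Bool.false_eq_true, if_false, h2, if_true, if_neg hV, if_pos hR]
        refine ih (n + 1) (pvStep ce p) (p :: V) ?_
        intro x y
        rw [pvMemd_step, List.mem_cons, hinv]
      · have h2 : pvMemd ed p.2 p.1 = false := by
          by_contra h
          simp only [Bool.not_eq_false] at h
          exact hR ((hed p.2 p.1).mp h)
        simp only [h1, h2, Bool.false_eq_true, if_false, if_neg hV, if_neg hR]
        exact ih n ce V hinv

-- ---- B-side lemmas: the canonical key ----

theorem pvKey_fst_le_snd (p : String × String) : (pvKey p).1 ≤ (pvKey p).2 := by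
  unfold pvKey
  split_ifs with h
  · exact h
  · exact le_of_not_ge h

theorem pvKey_eq_cases {p k : String × String} (h : pvKey p = k) :
    p = k ∨ p = (k.2, k.1) := by
  unfold pvKey at h
  split_ifs at h
  · exact Or.inl h
  · right
    obtain ⟨a, b⟩ := p
    cases h
    rfl

theorem pvKey_self {k : String × String} (h : k.1 ≤ k.2) : pvKey k = k := by
  unfold pvKey
  rw [if_pos h]

theorem pvKey_swap {k : String × String} (h : k.1 ≤ k.2) : pvKey (k.2, k.1) = k := by
  unfold pvKey
  by_cases h2 : k.2 ≤ k.1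
  · rw [if_pos h2]
    have : k.1 = k.2 := le_antisymm h h2
    obtain ⟨a, b⟩ := k
    simp_all
  · rw [if_neg h2]

-- membership of the fiber of a canonical key
theorem pvKey_fiber {k : String × String} (h : k.1 ≤ k.2) (p : String × String) :
    pvKey p = k ↔ p = k ∨ p = (k.2, k.1) := by
  constructor
  · exact pvKey_eq_cases
  · rintro (rfl | rfl)
    · exact pvKey_self h
    · exact pvKey_swap h

-- the per-key count: reciprocated directed edges in one unordered group
theorem pvFiber_card (T : Finset (String × String)) (k : String × String)
    (hcanon : k.1 ≤ k.2) (hne : ∃ p ∈ T, pvKey p = k) :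
    ((T.filter (fun p => pvKey p = k ∧ (p.2, p.1) ∈ T)).card : Int)
      = if k.1 = k.2 then 1
        else if ((T.filter (fun p => pvKey p = k)).card : Int) = 2 then 2 else 0 := by
  by_cases heq : k.1 = k.2
  · -- self-loop key: the fiber is {k} and k is its own reverse
    have hrk : (k.2, k.1) = k := by
      obtain ⟨a, b⟩ := k
      simp_all
    have hkT : k ∈ T := by
      obtain ⟨p, hpT, hpk⟩ := hne
      rcases pvKey_eq_cases hpk with rfl | rfl
      · exact hpT
      · rwa [hrk] at hpT
    have hfil : T.filter (fun p => pvKey p = k ∧ (p.2, p.1) ∈ T) = {k} := by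
      ext p
      simp only [Finset.mem_filter, Finset.mem_singleton, pvKey_fiber hcanon, hrk]
      constructor
      · rintro ⟨_, (rfl | rfl), _⟩ <;> rfl
      · rintro rfl
        exact ⟨hkT, Or.inl rfl, by rw [hrk]; exact hkT⟩
    rw [hfil, if_pos heq]
    simp
  · -- proper pair: k ≠ (k.2, k.1)
    have hkr : k ≠ (k.2, k.1) := by
      intro h
      obtain ⟨a, b⟩ := k
      simp_all
    have hrev_r : ((k.2, k.1).2, (k.2, k.1).1) = k := by
      obtain ⟨a, b⟩ := k
      rfl
    rw [if_neg heq]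
    by_cases hk : k ∈ T <;> by_cases hr : (k.2, k.1) ∈ T
    · -- both directions present
      have hfil2 : T.filter (fun p => pvKey p = k) = {k, (k.2, k.1)} := by
        ext p
        simp only [Finset.mem_filter, pvKey_fiber hcanon, Finset.mem_insert,
          Finset.mem_singleton]
        constructor
        · rintro ⟨_, h⟩; exact h
        · rintro (rfl | rfl) <;> simp_all
      have hfil1 : T.filter (fun p => pvKey p = k ∧ (p.2, p.1) ∈ T)
          = {k, (k.2, k.1)} := by
        ext p
        simp only [Finset.mem_filter, pvKey_fiber hcanon, Finset.mem_insert,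
          Finset.mem_singleton]
        constructor
        · rintro ⟨_, h, _⟩; exact h
        · rintro (rfl | rfl)
          · exact ⟨hk, Or.inl rfl, hr⟩
          · exact ⟨hr, Or.inr rfl, by rw [hrev_r]; exact hk⟩
      have hcard2 : ({k, (k.2, k.1)} : Finset (String × String)).card = 2 :=
        Finset.card_pair hkr
      rw [hfil1, hfil2, hcard2]
      norm_num
    · -- only (k.1, k.2) present: not reciprocated
      have hfil2 : T.filter (fun p => pvKey p = k) = {k} := by
        ext p
        simp only [Finset.mem_filter, pvKey_fiber hcanon, Finset.mem_singleton]
        constructor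
        · rintro ⟨hpT, (rfl | rfl)⟩
          · rfl
          · exact absurd hpT hr
        · rintro rfl; exact ⟨hk, Or.inl rfl⟩
      have hfil1 : T.filter (fun p => pvKey p = k ∧ (p.2, p.1) ∈ T) = ∅ := by
        rw [Finset.filter_eq_empty_iff]
        rintro p hpT ⟨hpk, hrev⟩
        rcases pvKey_eq_cases hpk with rfl | rfl
        · exact hr hrev
        · exact hr hpT
      rw [hfil1, hfil2]
      norm_num
    · -- only (k.2, k.1) present: not reciprocated
      have hfil2 : T.filter (fun p => pvKey p = k) = {(k.2, k.1)} := by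
        ext p
        simp only [Finset.mem_filter, pvKey_fiber hcanon, Finset.mem_singleton]
        constructor
        · rintro ⟨hpT, (rfl | rfl)⟩
          · exact absurd hpT hk
          · rfl
        · rintro rfl; exact ⟨hr, Or.inr rfl⟩
      have hfil1 : T.filter (fun p => pvKey p = k ∧ (p.2, p.1) ∈ T) = ∅ := by
        rw [Finset.filter_eq_empty_iff]
        rintro p hpT ⟨hpk, hrev⟩
        rcases pvKey_eq_cases hpk with rfl | rfl
        · exact hk hpT
        · rw [hrev_r] at hrev; exact hk hrev
      rw [hfil1, hfil2]
      norm_num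
    · -- neither present: fiber empty
      have hfil2 : T.filter (fun p => pvKey p = k) = ∅ := by
        rw [Finset.filter_eq_empty_iff]
        rintro p hpT hpk
        rcases pvKey_eq_cases hpk with rfl | rfl
        · exact hk hpT
        · exact hr hpT
      have hfil1 : T.filter (fun p => pvKey p = k ∧ (p.2, p.1) ∈ T) = ∅ := by
        rw [Finset.filter_eq_empty_iff]
        rintro p hpT ⟨hpk, _⟩
        rcases pvKey_eq_cases hpk with rfl | rfl
        · exact hk hpT
        · exact hr hpT
      rw [hfil1, hfil2]
      norm_num

-- counting occurrences of a key through a map (no library lemma matches this shape)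
theorem pvCount_map {α β : Type} [BEq β] (l : List α) (f : α → β)
    (k : β) : (l.map f).count k = l.countP (fun a => f a == k) := by
  induction l with
  | nil => rfl
  | cons a t ih => simp [List.count_cons, List.countP_cons, ih]

-- B equals the same Finset count
theorem pvB_card (L : List (String × String)) :
    cal_both_sided_edges_alt L
      = ((L.toFinset.filter (fun p => (p.2, p.1) ∈ L)).card : Int) := by
  unfold cal_both_sided_edges_alt
  dsimp only []
  have hg : (PySem.Set.ofList L).foldl
      (fun d p => d.insert (pvKey p) (d.getD (pvKey p) 0 + 1)) PySem.Dict.empty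
      = PySem.Dict.counter ((PySem.Set.ofList L).map pvKey) := by
    rw [← PySem.Dict.foldl_insert_getD_add_one_eq_counter, List.foldl_map]
  rw [hg, PySem.Dict.items_counter]
  -- names for the three stages
  have hSnd : (PySem.Set.ofList L).Nodup := PySem.Set.nodup_ofList L
  have hST : (PySem.Set.ofList L).toFinset = L.toFinset := by
    ext p
    simp [PySem.Set.mem_ofList]
  have hKnd : (PySem.Set.ofList ((PySem.Set.ofList L).map pvKey)).Nodup :=
    PySem.Set.nodup_ofList _
  -- the summation loop, as a sum over the key set
  rw [PySem.List.foldl_congr_mem'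
    ((PySem.Set.ofList ((PySem.Set.ofList L).map pvKey)).map
      (fun k => (k, ((((PySem.Set.ofList L).map pvKey)).count k : Int))))
    (fun n kv => if kv.1.1 == kv.1.2 then n + 1 else if kv.2 == 2 then n + 2 else n)
    (fun n kv => n + (if kv.1.1 == kv.1.2 then 1 else if kv.2 == 2 then 2 else 0))
    0 (by intro kv _ n; dsimp only; split_ifs <;> ring)]
  rw [PySem.List.foldl_add, List.map_map, zero_add]
  rw [← List.sum_toFinset _ hKnd]
  -- fiberwise decomposition of A's Finset count along the canonical key
  have hmemfib : Set.MapsTo pvKey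
      ↑(L.toFinset.filter (fun p => (p.2, p.1) ∈ L.toFinset))
      ↑((PySem.Set.ofList ((PySem.Set.ofList L).map pvKey)).toFinset) := by
    intro p hp
    rw [Finset.mem_coe, List.mem_toFinset, PySem.Set.mem_ofList]
    exact List.mem_map_of_mem (by
      rw [PySem.Set.mem_ofList]
      exact List.mem_toFinset.mp (Finset.mem_of_mem_filter p (Finset.mem_coe.mp hp)))
  have hfw := Finset.card_eq_sum_card_fiberwise hmemfib
  have hLT : L.toFinset.filter (fun p => (p.2, p.1) ∈ L)
      = L.toFinset.filter (fun p => (p.2, p.1) ∈ L.toFinset) := by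
    ext p
    simp [List.mem_toFinset]
  rw [hLT, hfw]
  push_cast
  apply Finset.sum_congr rfl
  intro k hk
  -- key facts about k
  have hkks : k ∈ (PySem.Set.ofList L).map pvKey := by
    rw [← PySem.Set.mem_ofList]
    exact List.mem_toFinset.mp hk
  obtain ⟨p0, hp0S, hp0k⟩ := List.mem_map.mp hkks
  have hcanon : k.1 ≤ k.2 := by
    rw [← hp0k]
    exact pvKey_fst_le_snd p0
  have hne : ∃ p ∈ L.toFinset, pvKey p = k :=
    ⟨p0, List.mem_toFinset.mpr ((PySem.Set.mem_ofList L p0).mp hp0S), hp0k⟩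
  -- the group size is the fiber's cardinality
  have hcount : (((PySem.Set.ofList L).map pvKey).count k : Int)
      = ((L.toFinset.filter (fun p => pvKey p = k)).card : Int) := by
    rw [pvCount_map, List.countP_eq_length_filter,
      ← List.toFinset_card_of_nodup (hSnd.filter _), List.toFinset_filter, hST]
    have : L.toFinset.filter (fun p => pvKey p == k)
        = L.toFinset.filter (fun p => pvKey p = k) := by
      ext p
      simp
    rw [this]
  -- the two filters agree up to the order of the conjuncts
  have hcomm : (L.toFinset.filter (fun p => (p.2, p.1) ∈ L.toFinset)).filter
        (fun p => pvKey p = k)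
      = L.toFinset.filter (fun p => pvKey p = k ∧ (p.2, p.1) ∈ L.toFinset) := by
    rw [Finset.filter_filter]
    ext p
    simp only [Finset.mem_filter]
    tauto
  rw [hcomm, pvFiber_card L.toFinset k hcanon hne]
  simp only [Function.comp_apply, beq_iff_eq, hcount]

-- ===== VERDICT (by name: the statement is the Claim_ definition above) =====
theorem cal_both_sided_edges_spec : Claim_equal_cal_both_sided_edges := by
  intro L _
  show cal_both_sided_edges L = cal_both_sided_edges_alt L
  unfold cal_both_sided_edges
  have hed : ∀ x y, pvMemd (L.foldl pvStep PySem.Dict.empty) x y = true ↔ (x, y) ∈ L := by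
    intro x y
    rw [pvMemd_foldl, pvMemd_empty]
    simp
  have hA := pvFold2_eq L (L.foldl pvStep PySem.Dict.empty) hed L 0 PySem.Dict.empty []
    (by intro x y; simp [pvMemd_empty])
  rw [hA, pvLoopA_card, pvB_card]
  simp
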